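-- pv_equiv track=rewrite | github.com/DFKI-NLP/ADE_templates | checklist_work/entity_extraction/ade_entity_extraction.py | get_noun_idx_list
-- ===== SOURCE A (Python) =====
-- def get_noun_idx_list(tagset: list[str])-> list[int]:
--     """
--     Helper function for create_NP_tagsets().
--     A function that checks all nouns in a tagset and saves their indices if the noun is a single noun or the first noun before another noun.
--     This means the noun_idx lists for in these cases ["noun"], ["adj", "noun"], ["noun", "noun"] are [0], [1], [0] respectively.
--     Second nouns after a noun are excluded because mostly ["noun", "noun"] is a compound noun and should be treated as one entity.
--
--     tagset: a list of str. Example: ["adj", "noun"]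
--
--     returns: Indices as a list of integers.
--     """
--
--     noun_idx = []
--     for tag_idx in range(len(tagset)):
--         if tagset[tag_idx] == "noun":
--             if tag_idx == 0: # noun is single or first nouns because of position
--                 noun_idx.append(tag_idx)
--             elif tagset[int(tag_idx -1)] != "noun": # noun is single or first noun because previous tag is not a noun
--                 noun_idx.append(tag_idx)
--             else: # noun is second noun in noun noun comb
--                 pass
--
--     return noun_idx
-- ===== SOURCE B (Python) =====
-- from itertools import groupby
--
-- def get_noun_idx_list(tagset: list[str]) -> list[int]:
--     noun_idx = []
--     offset = 0
--     for key, group in groupby(tagset):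
--         run_len = len(list(group))
--         if key == "noun":
--             noun_idx.append(offset)
--         offset += run_len
--     return noun_idx
-- ===== Notes on version B (the rewrite author's own statement) =====
-- stated objective: idiomatic
-- what changed: B iterates over maximal runs of equal tags with itertools.groupby, emitting the start offset of each 'noun' run, instead of A's index loop comparing each element with its predecessor.
import Mathlib
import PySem

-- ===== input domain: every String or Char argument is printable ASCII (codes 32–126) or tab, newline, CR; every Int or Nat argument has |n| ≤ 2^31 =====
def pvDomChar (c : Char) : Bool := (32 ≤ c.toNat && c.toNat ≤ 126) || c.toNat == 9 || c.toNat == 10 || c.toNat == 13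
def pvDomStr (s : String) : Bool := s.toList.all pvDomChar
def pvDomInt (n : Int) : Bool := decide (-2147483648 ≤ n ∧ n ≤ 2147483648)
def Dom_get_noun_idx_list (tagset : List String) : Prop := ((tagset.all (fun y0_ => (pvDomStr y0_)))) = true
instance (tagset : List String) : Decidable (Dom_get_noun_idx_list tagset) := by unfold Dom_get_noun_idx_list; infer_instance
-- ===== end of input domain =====

-- B iterates over maximal runs of equal tags (itertools.groupby), emitting the start offset of
-- each "noun" run, instead of A's index loop comparing each element to its predecessor (idiomatic).

-- ===== PORT A =====
-- tagset[tag_idx] and tagset[tag_idx - 1] are always in range here, so pyGetD with a default is exact.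
def get_noun_idx_list (tagset : List String) : List Int :=
  (PySem.List.pyRange 0 (tagset.length : Int) 1).foldl
    (fun noun_idx tag_idx =>
      if PySem.List.pyGetD tagset tag_idx "" = "noun" then
        if tag_idx = 0 then noun_idx ++ [tag_idx]
        else if PySem.List.pyGetD tagset (tag_idx - 1) "" ≠ "noun" then noun_idx ++ [tag_idx]
        else noun_idx
      else noun_idx) []

-- ===== PORT B =====
-- pvRun k xs = (length of the leading run of k in xs, the remainder): one step of groupby.
def pvRun (k : String) : List String → Nat × List String
  | [] => (0, [])
  | x :: xs => if x = k then ((pvRun k xs).1 + 1, (pvRun k xs).2) else (0, x :: xs)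

theorem pvRun_len (k : String) (xs : List String) : (pvRun k xs).2.length ≤ xs.length := by
  induction xs with
  | nil => simp [pvRun]
  | cons x xs ih =>
    by_cases h : x = k
    · simp [pvRun, h]; omega
    · simp [pvRun, h]

-- the groupby loop: emit the offset of each "noun" run, advance the offset by the run length.
def pvGo (off : Int) : List String → List Int
  | [] => []
  | x :: xs =>
    (if x = "noun" then [off] else []) ++ pvGo (off + ((pvRun x xs).1 + 1)) (pvRun x xs).2
termination_by l => l.length
decreasing_by simpa using Nat.lt_succ_of_le (pvRun_len x xs)

def get_noun_idx_list_alt (tagset : List String) : List Int := pvGo 0 tagset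

-- ===== PRECONDITION & SPEC =====
def Spec_get_noun_idx_list (tagset : List String) (out : List Int) : Prop := out = get_noun_idx_list_alt tagset
instance (tagset : List String) (out : List Int) : Decidable (Spec_get_noun_idx_list tagset out) := by unfold Spec_get_noun_idx_list; infer_instance

-- ===== CLAIM (what is proved, stated in full; the proofs are below) =====
def Claim_equal_get_noun_idx_list : Prop := ∀ (tagset : List String), Dom_get_noun_idx_list tagset → Spec_get_noun_idx_list tagset (get_noun_idx_list tagset)

-- ===== LEMMAS AND PROOFS =====

-- common reference: emit index i iff the tag is "noun" and the previous tag was not.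
def pvG (i : Int) (prev : Option String) : List String → List Int
  | [] => []
  | x :: xs => (if x = "noun" ∧ prev ≠ some "noun" then [i] else []) ++ pvG (i + 1) (some x) xs

theorem pvRun_split (k : String) (xs : List String) :
    xs = List.replicate (pvRun k xs).1 k ++ (pvRun k xs).2 ∧
    (∀ h, (pvRun k xs).2.head? = some h → h ≠ k) := by
  induction xs with
  | nil => simp [pvRun]
  | cons x xs ih =>
    by_cases h : x = k
    · simpa [pvRun, h, List.replicate_succ] using ih
    · refine ⟨by simp [pvRun, h], ?_⟩
      intro h' hh
      simp [pvRun, h] at hh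
      subst hh; exact h

theorem pvG_replicate (n : Nat) (x : String) (rest : List String) (i : Int) :
    pvG i (some x) (List.replicate n x ++ rest) = pvG (i + n) (some x) rest := by
  induction n generalizing i with
  | zero => simp
  | succ m ih =>
    have hx : ¬ (x = "noun" ∧ (some x : Option String) ≠ some "noun") := by
      rintro ⟨h1, h2⟩; exact h2 (by simp [h1])
    simp only [List.replicate_succ, List.cons_append, pvG, if_neg hx, List.nil_append, ih]
    congr 1; push_cast; ring

theorem pvGo_eq_pvG (l : List String) (off : Int) (prev : Option String)
    (hp : ∀ h, l.head? = some h → prev ≠ some h) : pvGo off l = pvG off prev l := by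
  induction off, l using pvGo.induct generalizing prev with
  | case1 => simp [pvGo, pvG]
  | case2 off x xs ih =>
    obtain ⟨hsplit, hhead⟩ := pvRun_split x xs
    rw [pvGo]
    have hprev : prev ≠ some x := hp x rfl
    have h1 : (if x = "noun" then [off] else [])
        = (if x = "noun" ∧ prev ≠ some "noun" then [off] else []) := by
      by_cases hx : x = "noun"
      · subst hx; simp [hprev]
      · simp [hx]
    rw [pvG, ← h1]
    congr 1
    conv_rhs => rw [hsplit]
    rw [pvG_replicate]
    rw [ih]
    · congr 1; ring
    · intro h hh
      have := hhead h hh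
      simp only [Ne, Option.some.injEq]
      exact fun hc => this hc.symm

theorem A_fold (tagset : List String) : ∀ (m k : Nat), k + m = tagset.length → ∀ acc,
    (PySem.List.pyRange (k : Int) (tagset.length : Int) 1).foldl
      (fun noun_idx tag_idx =>
        if PySem.List.pyGetD tagset tag_idx "" = "noun" then
          if tag_idx = 0 then noun_idx ++ [tag_idx]
          else if PySem.List.pyGetD tagset (tag_idx - 1) "" ≠ "noun" then noun_idx ++ [tag_idx]
          else noun_idx
        else noun_idx) acc
    = acc ++ pvG (k : Int) (if k = 0 then none else tagset[k-1]?) (tagset.drop k) := by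
  intro m
  induction m with
  | zero =>
    intro k hk acc
    have : tagset.drop k = [] := by rw [List.drop_eq_nil_iff]; omega
    rw [PySem.List.pyRange_one_eq_nil (by omega), this]
    simp [pvG]
  | succ m ih =>
    intro k hk acc
    have hklt : k < tagset.length := by omega
    rw [PySem.List.pyRange_one_cons (by exact_mod_cast hklt)]
    rw [List.foldl_cons]
    have hcast : ((k : Int) + 1) = ((k + 1 : Nat) : Int) := by push_cast; ring
    rw [hcast, ih (k+1) (by omega)]
    have hdrop : tagset.drop k = tagset[k] :: tagset.drop (k+1) :=
      List.drop_eq_getElem_cons hklt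
    have hget : PySem.List.pyGetD tagset (k : Int) "" = tagset[k] := by
      rw [PySem.List.pyGetD_natCast]; exact List.getD_eq_getElem _ _ hklt
    have hprev1 : (if k + 1 = 0 then none else tagset[(k+1)-1]?) = some tagset[k] := by
      simp [List.getElem?_eq_getElem hklt]
    rw [hprev1, hdrop, pvG, hget]
    by_cases hn : tagset[k] = "noun"
    · by_cases hk0 : k = 0
      · subst hk0
        simp [hn]
      · have hk0' : ((k : Int)) ≠ 0 := by exact_mod_cast hk0
        have hkm1 : ((k : Int) - 1) = ((k - 1 : Nat) : Int) := by
          have : 1 ≤ k := by omega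
          push_cast [this]; ring
        have hgetp : PySem.List.pyGetD tagset ((k : Int) - 1) "" = tagset[k-1] := by
          rw [hkm1, PySem.List.pyGetD_natCast]
          exact List.getD_eq_getElem _ _ (by omega)
        have hprev : (if k = 0 then none else tagset[k-1]?) = some tagset[k-1] := by
          simp [hk0, List.getElem?_eq_getElem (show k-1 < tagset.length by omega)]
        rw [hprev]
        by_cases hp : tagset[k-1] = "noun"
        · simp [hn, hk0, hgetp, hp]
        · simp [hn, hk0, hgetp, hp]
    · simp [hn]

-- ===== VERDICT (by name: the statement is the Claim_ definition above) =====
theorem get_noun_idx_list_spec : Claim_equal_get_noun_idx_list := by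
  intro tagset _
  unfold Spec_get_noun_idx_list get_noun_idx_list get_noun_idx_list_alt
  have hA := A_fold tagset tagset.length 0 (by omega) []
  simp only [Nat.cast_zero, List.drop_zero, List.nil_append, reduceIte] at hA
  rw [hA, Eq.symm (pvGo_eq_pvG tagset 0 none (by intro h _; simp))]
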